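-- pv_equiv track=rewrite | github.com/Yan9527/Principles_of_Computing_Coursera | Mini_Project_#5/user36_ZF2Pacnc0n_17.py | gen_all_strings
-- ===== SOURCE A (Python) =====
-- def gen_all_strings(word):
--     """
--     Generate all strings that can be composed from the letters in word
--     in any order.
--
--     Returns a list of all strings that can be formed from the letters
--     in word.
--
--     This function should be recursive.
--     """
--     if len(word) == 0:
--         return [""]
--     elif len(word) == 1:
--         return ["", word]
--     else:
--         first = word[0]
--         rest = word[1:]
--         rest_strings = gen_all_strings(rest)
--         temp_lst = []
--         for item in rest_strings:
--             for dummy_i in range(len(item)+1):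
--                 temp_string = item[:dummy_i] + first + item[dummy_i:]
--                 temp_lst.append(temp_string)
--         rest_strings.extend(temp_lst)
--         return rest_strings
-- ===== SOURCE B (Python) =====
-- def gen_all_strings(word):
--     """Iterative version: consume letters last-to-first, appending each
--     batch of insertions after the existing entries."""
--     if not word:
--         return [""]
--     result = ["", word[-1]]
--     for letter in reversed(word[:-1]):
--         inserts = []
--         for s in result:
--             for p in range(len(s) + 1):
--                 inserts.append(s[:p] + letter + s[p:])
--         result = result + inserts
--     return result
-- ===== Notes on version B (the rewrite author's own statement) =====
-- stated objective: alternative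
-- what changed: Replaces the recursion on the word's tail by an explicit iterative loop: start from the base list for the last letter and fold the remaining letters from last-to-first, appending each batch of insertions to the accumulated result.
import Mathlib
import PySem

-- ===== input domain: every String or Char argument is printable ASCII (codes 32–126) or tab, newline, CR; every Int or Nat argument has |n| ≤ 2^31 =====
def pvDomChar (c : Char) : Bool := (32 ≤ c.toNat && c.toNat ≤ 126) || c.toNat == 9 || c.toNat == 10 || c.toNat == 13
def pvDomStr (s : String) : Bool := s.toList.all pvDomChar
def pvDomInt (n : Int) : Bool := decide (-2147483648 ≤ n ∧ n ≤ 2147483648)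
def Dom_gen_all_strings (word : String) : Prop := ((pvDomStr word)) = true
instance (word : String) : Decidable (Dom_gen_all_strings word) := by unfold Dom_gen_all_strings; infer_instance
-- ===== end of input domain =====

-- B replaces A's recursion by an explicit last-to-first iterative loop (alternative decomposition, same cost).

-- ===== PORT A =====
-- inner loop body shared by both Pythons: 'item[:i] + first + item[i:]' for i in range(len(item)+1)
-- (exact: i ranges over 0..len(item), where the slices are take/drop)
def pvInsertAll (c : Char) (item : String) : List String :=
  (List.range (item.toList.length + 1)).map
    (fun i => String.ofList (item.toList.take i ++ [c] ++ item.toList.drop i))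

-- 'temp_lst = []; for item in rs: for …: temp_lst.append(…)'
def pvTemp (c : Char) (rs : List String) : List String :=
  rs.foldl (fun acc item => acc ++ pvInsertAll c item) []

def gen_all_strings_core : List Char → List String
  | [] => [""]
  | [c] => ["", String.ofList [c]]
  | first :: rest₀ :: rest =>
    let rest_strings := gen_all_strings_core (rest₀ :: rest)
    rest_strings ++ pvTemp first rest_strings

def gen_all_strings (word : String) : List String :=
  gen_all_strings_core word.toList

-- ===== PORT B =====
def gen_all_strings_alt (word : String) : List String :=
  match word.toList with
  | [] => [""]                      -- 'if not word: return [""]'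
  | c :: cs =>
    -- result = ["", word[-1]]; for letter in reversed(word[:-1]): result = result + inserts
    ((c :: cs).dropLast.reverse).foldl
      (fun result letter => result ++ pvTemp letter result)
      ["", String.ofList [(c :: cs).getLast (by simp)]]

-- ===== PRECONDITION & SPEC =====
def Spec_gen_all_strings (word : String) (out : List String) : Prop := out = gen_all_strings_alt word
instance (word : String) (out : List String) : Decidable (Spec_gen_all_strings word out) := by unfold Spec_gen_all_strings; infer_instance

-- ===== CLAIM (what is proved, stated in full; the proofs are below) =====
def Claim_equal_gen_all_strings : Prop := ∀ (word : String), Dom_gen_all_strings word → Spec_gen_all_strings word (gen_all_strings word)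

-- ===== LEMMAS AND PROOFS =====
theorem gen_core_foldl (init : List Char) (last : Char) :
    gen_all_strings_core (init ++ [last]) =
      (init.reverse).foldl (fun result letter => result ++ pvTemp letter result)
        ["", String.ofList [last]] := by
  induction init with
  | nil => simp [gen_all_strings_core]
  | cons c init' ih =>
    have hne : init' ++ [last] ≠ [] := by simp
    cases h : init' ++ [last] with
    | nil => exact absurd h hne
    | cons y ys =>
      have : gen_all_strings_core ((c :: init') ++ [last]) =
          gen_all_strings_core (y :: ys) ++ pvTemp c (gen_all_strings_core (y :: ys)) := by
        simp only [List.cons_append, h]; simp [gen_all_strings_core]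
      rw [this, ← h, ih]
      simp [List.foldl_append]

-- ===== VERDICT (by name: the statement is the Claim_ definition above) =====
theorem gen_all_strings_spec : Claim_equal_gen_all_strings := by
  intro word _
  unfold Spec_gen_all_strings gen_all_strings gen_all_strings_alt
  cases h : word.toList with
  | nil => simp [gen_all_strings_core]
  | cons c cs =>
    have hne : c :: cs ≠ [] := by simp
    have hsplit : (c :: cs).dropLast ++ [(c :: cs).getLast hne] = c :: cs :=
      List.dropLast_append_getLast hne
    conv_lhs => rw [← hsplit]
    rw [gen_core_foldl]
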